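-- pv_equiv track=rewrite | github.com/johann-wg/Learning | 프로그래머스/lv1/82612. 부족한 금액 계산하기/부족한 금액 계산하기.py | solution
-- ===== SOURCE A (Python) =====
-- def solution(price, money, count):
--     answer = 0
--     for i in range(1, count+1):
--         money -= price * i
--         if money < 0:
--             answer = abs(money)
--         elif money <= price:
--             answer = 0
--         else:
--             answer = -1
--     return answer
-- ===== SOURCE B (Python) =====
-- def solution(price, money, count):
--     # closed form: total cost of rides 1..count is an arithmetic series
--     if count < 1:
--         return 0
--     m = money - price * count * (count + 1) // 2
--     if m < 0:
--         return -m
--     return 0 if m <= price else -1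
-- ===== Notes on version B (the rewrite author's own statement) =====
-- stated objective: faster
-- what changed: Replaces the O(count) accumulation loop by the closed-form arithmetic-series sum price*count*(count+1)//2 and applies the last iteration's branch once.
import Mathlib
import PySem

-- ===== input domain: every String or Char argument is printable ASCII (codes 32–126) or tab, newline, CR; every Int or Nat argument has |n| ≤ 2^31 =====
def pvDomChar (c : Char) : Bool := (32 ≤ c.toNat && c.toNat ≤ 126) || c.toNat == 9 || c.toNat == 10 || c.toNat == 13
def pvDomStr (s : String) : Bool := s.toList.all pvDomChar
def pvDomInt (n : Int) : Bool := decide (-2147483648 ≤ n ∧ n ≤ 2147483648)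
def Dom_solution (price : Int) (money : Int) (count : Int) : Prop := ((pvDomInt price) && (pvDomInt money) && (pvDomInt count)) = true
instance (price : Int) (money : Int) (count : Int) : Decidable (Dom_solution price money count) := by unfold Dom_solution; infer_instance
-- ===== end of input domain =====

-- B replaces A's O(count) accumulation loop by the closed-form arithmetic-series sum (faster).

-- ===== PORT A =====
-- loop body of A: state is (money, answer)
def stepA (price : Int) (st : Int × Int) (i : Int) : Int × Int :=
  let money := st.1 - price * i
  let answer := if money < 0 then |money| else if money ≤ price then 0 else -1
  (money, answer)

def solution (price : Int) (money : Int) (count : Int) : Int :=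
  ((PySem.List.pyRange 1 (count + 1) 1).foldl (stepA price) (money, 0)).2

-- ===== PORT B =====
def solution_alt (price : Int) (money : Int) (count : Int) : Int :=
  if count < 1 then 0
  else
    let m := money - PySem.Int.floordiv (price * count * (count + 1)) 2
    if m < 0 then -m
    else if m ≤ price then 0 else -1

-- ===== PRECONDITION & SPEC =====
def Spec_solution (price : Int) (money : Int) (count : Int) (out : Int) : Prop := out = solution_alt price money count
instance (price : Int) (money : Int) (count : Int) (out : Int) : Decidable (Spec_solution price money count out) := by unfold Spec_solution; infer_instance

-- ===== CLAIM (what is proved, stated in full; the proofs are below) =====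
def Claim_equal_solution : Prop := ∀ (price : Int) (money : Int) (count : Int), Dom_solution price money count → Spec_solution price money count (solution price money count)

-- ===== LEMMAS AND PROOFS =====

-- sum of 1..n as an Int
def sumTo : Nat → Int
  | 0 => 0
  | n + 1 => sumTo n + (n + 1)

lemma two_mul_sumTo (n : Nat) : 2 * sumTo n = (n : Int) * (n + 1) := by
  induction n with
  | zero => simp [sumTo]
  | succ k ih =>
    simp only [sumTo]
    push_cast
    push_cast at ih
    linarith

lemma loopA_eq (price money a0 : Int) (n : Nat) (hn : 1 ≤ n) :
    (PySem.List.pyRange 1 ((n : Int) + 1) 1).foldl (stepA price) (money, a0) =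
      (money - price * sumTo n,
        if money - price * sumTo n < 0 then |money - price * sumTo n|
        else if money - price * sumTo n ≤ price then 0 else -1) := by
  induction n with
  | zero => omega
  | succ k ih =>
    by_cases hk : 1 ≤ k
    · have hsplit : PySem.List.pyRange 1 ((↑(k + 1) : Int) + 1) 1 =
          PySem.List.pyRange 1 ((k : Int) + 1) 1 ++ [(k : Int) + 1] := by
        have h := PySem.List.pyRange_one_succ_right (show (1 : Int) ≤ (k : Int) + 1 by omega)
        push_cast
        push_cast at h
        exact h
      rw [hsplit, List.foldl_append, ih hk]
      simp only [List.foldl, stepA, sumTo]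
      ring_nf
    · have hk0 : k = 0 := by omega
      subst hk0
      have h1 : PySem.List.pyRange 1 ((((0 : Nat) + 1 : Nat) : Int) + 1) 1 = [(1 : Int)] := by
        have he : ((((0 : Nat) + 1 : Nat) : Int) + 1) = (1 : Int) + 1 := by norm_num
        rw [he, PySem.List.pyRange_one_singleton]
      rw [h1]
      simp [List.foldl, stepA, sumTo]

lemma floordiv_closed (price : Int) (n : Nat) :
    PySem.Int.floordiv (price * (n : Int) * ((n : Int) + 1)) 2 = price * sumTo n := by
  have h : price * (n : Int) * ((n : Int) + 1) = 2 * (price * sumTo n) := by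
    rw [mul_assoc, ← two_mul_sumTo n]
    ring
  rw [h, PySem.Int.floordiv_eq_ediv_of_pos (by norm_num)]
  omega

-- ===== VERDICT (by name: the statement is the Claim_ definition above) =====
theorem solution_spec : Claim_equal_solution := by
  intro price money count _
  unfold Spec_solution solution solution_alt
  by_cases hc : count < 1
  · rw [PySem.List.pyRange_one_eq_nil (by omega)]
    simp [hc]
  · rw [not_lt] at hc
    set n : Nat := count.toNat with hn
    have hcn : count = (n : Int) := by omega
    have hn1 : 1 ≤ n := by omega
    rw [hcn, loopA_eq price money 0 n hn1,
        if_neg (show ¬((n : Int) < 1) by omega), floordiv_closed]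
    by_cases h1 : money - price * sumTo n < 0
    · rw [if_pos h1, if_pos h1, abs_of_neg h1]
    · rw [if_neg h1, if_neg h1]
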